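-- pv_equiv track=rewrite | github.com/harry-clarke/advent_of_code_2019 | puzzle_04/puzzle_4.py | has_double_2
-- ===== SOURCE A (Python) =====
-- def has_double_2(p):
--     groups = []
--     a = p[0]
--     count = 1
--     for b in p[1:]:
--         if a == b:
--             count += 1
--         else:
--             groups.append(count)
--             count = 1
--             a = b
--     groups.append(count)
--     return any([g == 2 for g in groups])
-- ===== SOURCE B (Python) =====
-- def has_double_2(p):
--     # isolated-pair scan: a run of length exactly 2 exists iff some adjacent
--     # equal pair has different (or absent) neighbours on both sides
--     n = len(p)
--     return any(p[i] == p[i + 1]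
--                and (i == 0 or p[i - 1] != p[i])
--                and (i + 2 >= n or p[i + 2] != p[i])
--                for i in range(n - 1))
-- ===== Notes on version B (the rewrite author's own statement) =====
-- stated objective: alternative
-- what changed: B drops A's run-length accumulation (build the list of group lengths, then any(g==2)) and instead scans adjacent index pairs, returning whether some equal pair p[i]==p[i+1] is isolated (different or absent neighbour on each side).
import Mathlib
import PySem

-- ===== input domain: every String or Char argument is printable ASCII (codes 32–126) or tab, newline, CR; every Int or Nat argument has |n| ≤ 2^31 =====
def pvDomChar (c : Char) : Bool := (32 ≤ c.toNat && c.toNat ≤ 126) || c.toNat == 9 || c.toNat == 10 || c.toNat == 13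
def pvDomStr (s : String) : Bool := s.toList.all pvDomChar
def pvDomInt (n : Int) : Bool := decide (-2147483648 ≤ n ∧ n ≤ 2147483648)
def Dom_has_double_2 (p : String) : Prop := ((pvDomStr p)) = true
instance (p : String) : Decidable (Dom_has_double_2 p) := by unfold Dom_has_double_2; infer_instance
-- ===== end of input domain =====

-- B replaces A's run-length accumulation (collect group lengths, then any(g==2)) with a
-- positional scan for an isolated adjacent equal pair (a different algorithm of the same cost).

-- ===== PORT A =====
-- for b in p[1:]: extend current run or flush its length to groups; then any([g == 2 ...])
def has_double_2 (p : String) : Bool :=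
  match p.toList with
  | [] => false   -- excluded by Pre_ (A raises IndexError on p[0])
  | a :: rest =>
    let st := rest.foldl
      (fun (st : List Nat × Char × Nat) b =>
        if st.2.1 == b then (st.1, st.2.1, st.2.2 + 1)
        else (st.1 ++ [st.2.2], b, 1))
      ([], a, 1)
    let groups := st.1 ++ [st.2.2]
    (groups.map (fun g => g == 2)).any id

-- ===== PORT B =====
-- the condition of Source B's generator expression for index i (indices are in range wherever
-- their value matters, so getD with an arbitrary default is exact)
def bCond (l : List Char) (i : Nat) : Bool :=
  (l.getD i 'a' == l.getD (i + 1) 'a') &&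
  ((i == 0) || (l.getD (i - 1) 'a' != l.getD i 'a')) &&
  (decide (i + 2 ≥ l.length) || (l.getD (i + 2) 'a' != l.getD i 'a'))

-- any(cond(i) for i in range(n - 1))
def has_double_2_alt (p : String) : Bool :=
  (List.range (p.toList.length - 1)).any (fun i => bCond p.toList i)

-- ===== PRECONDITION & SPEC =====
-- A evaluates p[0]: it raises IndexError exactly on the empty string, which Pre_ excludes.
def Pre_has_double_2 (p : String) : Prop := p.toList ≠ []
instance (p : String) : Decidable (Pre_has_double_2 p) := by unfold Pre_has_double_2; infer_instance
def pvWitness_has_double_2 : String := "112"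

def Spec_has_double_2 (p : String) (out : Bool) : Prop := out = has_double_2_alt p
instance (p : String) (out : Bool) : Decidable (Spec_has_double_2 p out) := by unfold Spec_has_double_2; infer_instance

-- ===== CLAIM (what is proved, stated in full; the proofs are below) =====
def Claim_equal_has_double_2 : Prop := ∀ (p : String), Dom_has_double_2 p → Pre_has_double_2 p → Spec_has_double_2 p (has_double_2 p)

-- ===== LEMMAS AND PROOFS =====

-- reference run-length list "remaining runs", parameterised by current char and count
def runsFrom (a : Char) (count : Nat) : List Char → List Nat
  | [] => [count]
  | b :: t => if a == b then runsFrom a (count + 1) t else count :: runsFrom b 1 t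

-- A's fold followed by the final append computes runsFrom
theorem foldA_eq_runsFrom (t : List Char) (groups : List Nat) (a : Char) (count : Nat) :
    (t.foldl
        (fun (st : List Nat × Char × Nat) b =>
          if st.2.1 == b then (st.1, st.2.1, st.2.2 + 1)
          else (st.1 ++ [st.2.2], b, 1))
        (groups, a, count)).1 ++
      [(t.foldl
        (fun (st : List Nat × Char × Nat) b =>
          if st.2.1 == b then (st.1, st.2.1, st.2.2 + 1)
          else (st.1 ++ [st.2.2], b, 1))
        (groups, a, count)).2.2] = groups ++ runsFrom a count t := by
  induction t generalizing groups a count with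
  | nil => simp [runsFrom]
  | cons b t ih =>
    simp only [List.foldl_cons, runsFrom, beq_iff_eq] at ih ⊢
    by_cases h : a = b
    · subst h
      simp only [if_true]
      exact ih groups a (count + 1)
    · simp only [if_neg h]
      rw [ih]
      simp

-- any(g == 2) over runsFrom, fused into one recursion (proof device)
def altGo (c : Char) (k : Nat) : List Char → Bool
  | [] => k == 2
  | b :: rest => if c == b then altGo c (k + 1) rest else (k == 2) || altGo b 1 rest

theorem runsFrom_any_eq_altGo (t : List Char) (c : Char) (k : Nat) :
    (runsFrom c k t).any (fun g => g == 2) = altGo c k t := by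
  induction t generalizing c k with
  | nil => simp [runsFrom, altGo]
  | cons b t ih =>
    by_cases h : c = b
    · simp [runsFrom, altGo, h, ih]
    · have hb : (c == b) = false := by simp [h]
      simp [runsFrom, altGo, hb, ih]

-- structural form of B's scan: look for an isolated adjacent equal pair, carrying the
-- previous character (proof device)
def pairScan : Option Char → List Char → Bool
  | prev, a :: b :: t => ((a == b) && (prev != some a) && (t.head? != some a)) || pairScan (some a) (b :: t)
  | _, _ => false

theorem option_bne_some (a x : Char) : ((some a : Option Char) != some x) = (a != x) := by
  simp [bne]

-- pairScan through a maximal leading block of k+1 copies of a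
theorem pairScan_replicate (a : Char) (rest : List Char) (hrest : rest.head? ≠ some a) :
    ∀ (k : Nat) (prev : Option Char),
      pairScan prev (List.replicate (k + 1) a ++ rest)
        = ((((k + 1 : Nat) == 2) && (prev != some a)) || pairScan (some a) rest) := by
  intro k
  induction k with
  | zero =>
    intro prev
    cases rest with
    | nil => simp [pairScan]
    | cons c t =>
      have hca : (a == c) = false := by
        have : a ≠ c := fun h => hrest (by simp [h])
        simp [this]
      simp [pairScan, hca]
  | succ k ih =>
    intro prev
    have hsplit : List.replicate (k + 2) a ++ rest
        = a :: a :: (List.replicate k a ++ rest) := by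
      simp [List.replicate_succ]
    rw [hsplit]
    have htail : (a :: (List.replicate k a ++ rest)) = List.replicate (k + 1) a ++ rest := by
      simp [List.replicate_succ]
    simp only [pairScan, htail, ih (some a)]
    cases k with
    | zero =>
      have hhd : ((List.replicate 0 a ++ rest).head? != some a) = true := by
        simp only [List.replicate_zero, List.nil_append]
        simp [bne]; intro h; exact hrest h
      simp only [List.replicate_zero, List.nil_append] at hhd
      simp [hhd]
    | succ m =>
      have hhd : (List.replicate (m + 1) a ++ rest).head? = some a := by
        simp [List.replicate_succ]
      simp [hhd]

-- altGo equals pairScan on the run-decomposed list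
theorem altGo_eq_pairScan (t : List Char) (a : Char) (k : Nat) (prev : Option Char)
    (hprev : prev ≠ some a) :
    pairScan prev (List.replicate (k + 1) a ++ t) = altGo a (k + 1) t := by
  induction t generalizing a k prev with
  | nil =>
    rw [pairScan_replicate a [] (by simp) k prev]
    have hp : (prev != some a) = true := by simp [bne]; intro h; exact hprev h
    simp [altGo, hp, pairScan]
  | cons b t ih =>
    by_cases hab : a = b
    · subst hab
      have hmerge : List.replicate (k + 1) a ++ a :: t = List.replicate (k + 2) a ++ t := by
        simp [List.replicate_succ' (n := k + 1)]
      rw [hmerge, ih a (k + 1) prev hprev]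
      simp [altGo]
    · have hhd : (List.head? (b :: t)) ≠ some a := by
        simp; exact fun h => hab h.symm
      rw [pairScan_replicate a (b :: t) hhd k prev]
      have hp : (prev != some a) = true := by simp [bne]; intro h; exact hprev h
      have hB : pairScan (some a) (b :: t) = altGo b 1 t := by
        simpa using ih b 0 (some a) (by simp [hab])
      have hab' : (a == b) = false := by simp [hab]
      simp [altGo, hab', hp, hB]

-- B's condition with an explicit previous character for position 0 (proof device)
def condP (prev : Option Char) (l : List Char) (i : Nat) : Bool :=
  (l.getD i 'a' == l.getD (i + 1) 'a') &&
  (if i = 0 then (prev != some (l.getD 0 'a')) else (l.getD (i - 1) 'a' != l.getD i 'a')) &&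
  (decide (i + 2 ≥ l.length) || (l.getD (i + 2) 'a' != l.getD i 'a'))

theorem bCond_eq_condP (l : List Char) (i : Nat) : bCond l i = condP none l i := by
  have hnone : ∀ c : Char, ((none : Option Char) != some c) = true := fun c => rfl
  cases i with
  | zero => simp [bCond, condP, hnone]
  | succ n => simp [bCond, condP]

theorem condP_shift (prev : Option Char) (a : Char) (t : List Char) (i : Nat) :
    condP prev (a :: t) (i + 1) = condP (some a) t i := by
  have hdec : decide (i + 1 + 2 ≥ (a :: t).length) = decide (i + 2 ≥ t.length) := by
    simp only [List.length_cons]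
    exact decide_eq_decide.mpr (by omega)
  cases i with
  | zero =>
    simp only [condP, List.getD_cons_succ, List.getD_cons_zero, hdec, option_bne_some]
    simp
  | succ n =>
    simp only [condP, List.getD_cons_succ, hdec]
    simp

-- index scan over range equals the structural scan
theorem range_any_condP (l : List Char) (prev : Option Char) :
    (List.range (l.length - 1)).any (fun i => condP prev l i) = pairScan prev l := by
  induction l generalizing prev with
  | nil => simp [pairScan]
  | cons a t ih =>
    cases t with
    | nil => simp [pairScan, condP]
    | cons b t' =>
      have h0 : condP prev (a :: b :: t') 0
          = ((a == b) && (prev != some a) && (t'.head? != some a)) := by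
        cases t' with
        | nil => simp [condP]
        | cons c t'' =>
          simp [condP, option_bne_some]
      have hlen : (a :: b :: t').length - 1 = (b :: t').length - 1 + 1 := by simp
      rw [hlen, List.range_succ_eq_map]
      simp only [List.any_cons, List.any_map, Function.comp_def, Nat.succ_eq_add_one, condP_shift]
      rw [ih (some a), h0]
      simp [pairScan]

-- ===== VERDICT (by name: the statement is the Claim_ definition above) =====
theorem has_double_2_spec : Claim_equal_has_double_2 := by
  intro p _ hpre
  unfold Spec_has_double_2 has_double_2 has_double_2_alt
  cases hl : p.toList with
  | nil => exact absurd hl hpre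
  | cons a rest =>
    dsimp only
    rw [foldA_eq_runsFrom rest [] a 1]
    simp only [List.nil_append]
    have hA : ((runsFrom a 1 rest).map (fun g => g == 2)).any id
        = altGo a 1 rest := by
      rw [← runsFrom_any_eq_altGo rest a 1]
      simp [List.any_map]
    rw [hA]
    have hB : pairScan none (a :: rest) = altGo a 1 rest := by
      simpa using altGo_eq_pairScan rest a 0 none (by simp)
    simp only [bCond_eq_condP]
    rw [range_any_condP (a :: rest) none, hB]
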